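-- pv_equiv track=rewrite | github.com/shreyas-selvaraj/geeks_for_geeks_problems | arrays/max_sum_path.py | max_sum_path
-- ===== SOURCE A (Python) =====
-- def max_sum_path(arr1, arr2):
-- 	minimum = min(len(arr1), len(arr2))
-- 	maximum = max(len(arr1), len(arr2))
-- 	s = 0
-- 	ptr = 0
--
-- 	while(ptr < minimum):
-- 		s += max(arr1[ptr], arr2[ptr])
-- 		ptr += 1
--
-- 	if(len(arr1) <= len(arr2)):
-- 		for i in range(minimum, maximum):
-- 			s += arr2[i]
--
-- 	if(len(arr1) > len(arr2)):
-- 		for i in range(minimum, maximum):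
-- 			s += arr1[i]
-- 	return s
-- ===== SOURCE B (Python) =====
-- def max_sum_path(arr1, arr2):
--     # max(a,b) = a + b - min(a,b): count every element of both arrays once,
--     # then subtract the pairwise minima over the overlapping prefix.
--     return sum(arr1) + sum(arr2) - sum(min(a, b) for a, b in zip(arr1, arr2))
-- ===== Notes on version B (the rewrite author's own statement) =====
-- stated objective: alternative
-- what changed: Replaces the sum-of-pairwise-maxima loop plus the two length-comparison tail branches with the complement identity max(a,b)=a+b-min(a,b): B returns sum(arr1)+sum(arr2) minus the sum of pairwise minima over the zipped prefix, so no maxima, no tails and no length branch are computed.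
import Mathlib
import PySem

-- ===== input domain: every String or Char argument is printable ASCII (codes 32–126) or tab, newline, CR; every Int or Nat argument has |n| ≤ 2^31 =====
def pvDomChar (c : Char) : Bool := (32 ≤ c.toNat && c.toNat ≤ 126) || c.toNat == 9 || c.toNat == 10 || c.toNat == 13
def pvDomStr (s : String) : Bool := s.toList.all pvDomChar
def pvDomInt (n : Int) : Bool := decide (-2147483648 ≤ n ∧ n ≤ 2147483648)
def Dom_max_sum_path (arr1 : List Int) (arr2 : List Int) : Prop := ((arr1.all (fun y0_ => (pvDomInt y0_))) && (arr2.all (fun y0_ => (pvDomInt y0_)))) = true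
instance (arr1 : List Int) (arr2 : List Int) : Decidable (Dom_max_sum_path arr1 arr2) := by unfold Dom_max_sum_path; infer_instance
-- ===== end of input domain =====

-- B uses the complement identity max(a,b) = a+b-min(a,b): it returns sum(arr1)+sum(arr2) minus the
-- sum of pairwise minima of the zipped prefix, with no maxima, no tail sums and no length branch.

-- ===== PORT A =====
def max_sum_path (arr1 : List Int) (arr2 : List Int) : Int :=
  let minimum : Int := min (arr1.length : Int) (arr2.length : Int)
  let maximum : Int := max (arr1.length : Int) (arr2.length : Int)
  -- while ptr < minimum: s += max(arr1[ptr], arr2[ptr])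
  let s : Int := (PySem.List.pyRange 0 minimum 1).foldl
      (fun s ptr => s + max (PySem.List.pyGetD arr1 ptr 0) (PySem.List.pyGetD arr2 ptr 0)) 0
  let s : Int := if arr1.length ≤ arr2.length then
      (PySem.List.pyRange minimum maximum 1).foldl (fun s i => s + PySem.List.pyGetD arr2 i 0) s
    else s
  let s : Int := if arr1.length > arr2.length then
      (PySem.List.pyRange minimum maximum 1).foldl (fun s i => s + PySem.List.pyGetD arr1 i 0) s
    else s
  s

-- ===== PORT B =====
def max_sum_path_alt (arr1 : List Int) (arr2 : List Int) : Int :=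
  arr1.sum + arr2.sum - (List.zipWith min arr1 arr2).sum

-- ===== PRECONDITION & SPEC =====
def Spec_max_sum_path (arr1 : List Int) (arr2 : List Int) (out : Int) : Prop := out = max_sum_path_alt arr1 arr2
instance (arr1 : List Int) (arr2 : List Int) (out : Int) : Decidable (Spec_max_sum_path arr1 arr2 out) := by unfold Spec_max_sum_path; infer_instance

-- ===== CLAIM (what is proved, stated in full; the proofs are below) =====
def Claim_equal_max_sum_path : Prop := ∀ (arr1 : List Int) (arr2 : List Int), Dom_max_sum_path arr1 arr2 → Spec_max_sum_path arr1 arr2 (max_sum_path arr1 arr2)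

-- ===== LEMMAS AND PROOFS =====

-- A's while loop over the common prefix accumulates the sum of elementwise maxima.
theorem prefix_loop_eq (xs ys : List Int) (n : Nat) (hx : n ≤ xs.length) (hy : n ≤ ys.length)
    (s : Int) :
    (PySem.List.pyRange 0 (n : Int) 1).foldl
        (fun s ptr => s + max (PySem.List.pyGetD xs ptr 0) (PySem.List.pyGetD ys ptr 0)) s
      = s + (List.zipWith max (xs.take n) (ys.take n)).sum := by
  induction n generalizing s with
  | zero => simp [PySem.List.pyRange_one_eq_nil]
  | succ k ih =>
    have hxk : k < xs.length := by omega
    have hyk : k < ys.length := by omega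
    have hk : (0 : Int) ≤ (k : Int) := by omega
    rw [show ((k + 1 : Nat) : Int) = (k : Int) + 1 by push_cast; ring,
        PySem.List.pyRange_one_succ_right hk, List.foldl_append,
        ih (by omega) (by omega)]
    have hstep : List.zipWith max (List.take (k+1) xs) (List.take (k+1) ys)
        = List.zipWith max (List.take k xs) (List.take k ys) ++ [max xs[k] ys[k]] := by
      rw [List.take_add_one, List.take_add_one,
          List.getElem?_eq_getElem hxk, List.getElem?_eq_getElem hyk]
      simp only [Option.toList_some]
      rw [List.zipWith_append (by simp; omega)]
      simp
    rw [hstep]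
    simp [PySem.List.pyGetD_natCast, List.getD, hxk, hyk, List.sum_append]
    ring

-- The tail loop over [n, len zs) accumulates the sum of zs's tail.
theorem tail_loop_eq (zs : List Int) (n : Nat) (s : Int) :
    (PySem.List.pyRange (n : Int) (zs.length : Int) 1).foldl
        (fun s i => s + PySem.List.pyGetD zs i 0) s
      = s + (zs.drop n).sum := by
  rw [PySem.List.foldl_pyRange_pyGetD' zs 0 (fun a b => a + b) s (by omega : (0:Int) ≤ (n:Int))]
  have hid : (fun (a b : Int) => a + b) = fun acc x => acc + id x := rfl
  rw [hid, PySem.List.foldl_add]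
  simp

theorem zipWith_take_min (xs ys : List Int) :
    List.zipWith max (xs.take (min xs.length ys.length)) (ys.take (min xs.length ys.length))
      = List.zipWith max xs ys := by
  rw [← List.take_zipWith]
  exact List.take_of_length_le (by simp)

-- Complement identity lifted to lists: maxima over the common prefix plus both tails
-- equals the two full sums minus the pairwise minima.
theorem max_min_complement (xs ys : List Int) :
    (List.zipWith max xs ys).sum
      + (xs.drop (min xs.length ys.length)).sum
      + (ys.drop (min xs.length ys.length)).sum
      = xs.sum + ys.sum - (List.zipWith min xs ys).sum := by
  induction xs generalizing ys with
  | nil => simp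
  | cons x xs ih =>
    cases ys with
    | nil => simp
    | cons y ys =>
      have h : min (x :: xs).length (y :: ys).length = min xs.length ys.length + 1 := by
        simp only [List.length_cons]; omega
      rw [h]
      simp only [List.zipWith_cons_cons, List.sum_cons, List.drop_succ_cons]
      have := ih ys
      have hmm : max x y + min x y = x + y := by
        rcases le_total x y with hxy | hxy <;> simp [hxy] <;> ring
      omega

-- ===== VERDICT (by name: the statement is the Claim_ definition above) =====
theorem max_sum_path_spec : Claim_equal_max_sum_path := by
  intro arr1 arr2 _
  unfold Spec_max_sum_path max_sum_path max_sum_path_alt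
  simp only
  rw [← max_min_complement arr1 arr2]
  rcases le_or_gt arr1.length arr2.length with h | h
  · have hmin : min (arr1.length : Int) (arr2.length : Int) = (arr1.length : Int) := by
      simp; omega
    have hmax : max (arr1.length : Int) (arr2.length : Int) = (arr2.length : Int) := by
      simp; omega
    have hn : min arr1.length arr2.length = arr1.length := by omega
    rw [if_neg (show ¬ arr1.length > arr2.length by omega), if_pos h, hmin, hmax,
        prefix_loop_eq arr1 arr2 arr1.length (le_refl _) h,
        tail_loop_eq arr2 arr1.length, hn, ← hn, zipWith_take_min, hn,
        List.drop_length]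
    simp
  · have hmin : min (arr1.length : Int) (arr2.length : Int) = (arr2.length : Int) := by
      simp; omega
    have hmax : max (arr1.length : Int) (arr2.length : Int) = (arr1.length : Int) := by
      simp; omega
    have hn : min arr1.length arr2.length = arr2.length := by omega
    rw [if_pos h, if_neg (show ¬ arr1.length ≤ arr2.length by omega), hmin, hmax,
        prefix_loop_eq arr1 arr2 arr2.length (by omega) (le_refl _),
        tail_loop_eq arr1 arr2.length, hn, ← hn, zipWith_take_min, hn,
        List.drop_length]
    simp
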